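-- pv_equiv track=rewrite | github.com/jk-jung/problem-solving | codewars/6kyu/6_One is the loneliest number.py | loneliest
-- ===== SOURCE A (Python) =====
-- def loneliest(s):
--     s = str(s)
--     def f(k):
--         x = int(s[k])
--         r = -x
--         for i in range(k - x, k + x + 1):
--             if 0 <= i < len(s):
--                 r += int(s[i])
--         return r
--     m = min(f(i) for i in range(len(s)))
--     for i in range(len(s)):
--         if s[i] == '1' and f(i) == m: return True
--     return False
-- ===== SOURCE B (Python) =====
-- def loneliest(s):
--     s = str(s)
--     n = len(s)
--     vals = [int(c) for c in s]
--     P = [0]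
--     acc = 0
--     for v in vals:
--         acc += v
--         P.append(acc)
--     def f(k):
--         x = vals[k]
--         return P[min(n, k + x + 1)] - P[max(0, k - x)] - x
--     m = min(f(i) for i in range(n))
--     return any(s[i] == '1' and f(i) == m for i in range(n))
-- ===== Notes on version B (the rewrite author's own statement) =====
-- stated objective: faster
-- what changed: Replaces the per-index inner window scan with a prefix-sum array built once, so each window sum becomes two O(1) clamped lookups.
import Mathlib
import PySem

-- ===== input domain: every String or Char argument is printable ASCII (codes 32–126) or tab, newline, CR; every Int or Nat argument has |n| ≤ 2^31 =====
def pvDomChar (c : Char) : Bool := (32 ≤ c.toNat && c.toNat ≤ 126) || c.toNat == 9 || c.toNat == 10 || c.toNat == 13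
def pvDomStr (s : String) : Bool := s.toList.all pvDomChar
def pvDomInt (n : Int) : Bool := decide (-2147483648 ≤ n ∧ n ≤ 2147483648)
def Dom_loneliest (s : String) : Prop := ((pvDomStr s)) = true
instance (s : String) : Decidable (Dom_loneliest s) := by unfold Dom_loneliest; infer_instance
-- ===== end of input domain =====

-- B replaces A's per-index inner window scan by a prefix-sum array with two clamped O(1) lookups per index (faster by a constant factor).

-- ===== PORT A =====
-- int(s[i]) for a digit character (Pre_ ensures every character is a digit; Python raises otherwise)
def digOf (cs : List Char) (i : Int) : Int :=
  match PySem.List.pyGet? cs i with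
  | some c => (c.toNat : Int) - 48
  | none => 0

def lonF (cs : List Char) (k : Int) : Int :=
  let x := digOf cs k
  (PySem.List.pyRange (k - x) (k + x + 1) 1).foldl
    (fun r i => if 0 ≤ i ∧ i < (cs.length : Int) then r + digOf cs i else r) (-x)

def loneliest (s : String) : Bool :=
  let cs := s.toList
  match PySem.List.min? ((PySem.List.pyRange 0 cs.length 1).map (lonF cs)) (fun v => v) with
  | none => false   -- Python: min() raises ValueError on the empty string (excluded by Pre_)
  | some m =>
    (PySem.List.pyRange 0 cs.length 1).any
      (fun i => decide (PySem.List.pyGet? cs i = some '1') && (lonF cs i == m))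

-- ===== PORT B =====
-- the P-building loop of Source B (P = [0]; for v in vals: acc += v; P.append(acc)), acc carried as parameter
def pvScan (acc : Int) : List Int → List Int
  | [] => [acc]
  | v :: vs => acc :: pvScan (acc + v) vs

def lonFB (n : Int) (vals P : List Int) (k : Int) : Int :=
  let x := PySem.List.pyGetD vals k 0
  PySem.List.pyGetD P (min n (k + x + 1)) 0 - PySem.List.pyGetD P (max 0 (k - x)) 0 - x

def loneliest_alt (s : String) : Bool :=
  let cs := s.toList
  let n : Int := cs.length
  let vals := cs.map (fun c => (c.toNat : Int) - 48)   -- int(c) for digit c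
  let P := pvScan 0 vals
  match PySem.List.min? ((PySem.List.pyRange 0 n 1).map (lonFB n vals P)) (fun v => v) with
  | none => false
  | some m =>
    (PySem.List.pyRange 0 n 1).any
      (fun i => decide (PySem.List.pyGet? cs i = some '1') && (lonFB n vals P i == m))

-- ===== PRECONDITION & SPEC =====
-- Pre_ is exactly A's returning domain: on the empty string min() raises ValueError, and on any
-- non-digit character int(s[k]) raises ValueError.
def Pre_loneliest (s : String) : Prop :=
  s.toList ≠ [] ∧ s.toList.all Char.isDigit = true
instance (s : String) : Decidable (Pre_loneliest s) := by unfold Pre_loneliest; infer_instance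
def pvWitness_loneliest : String := "34566"

def Spec_loneliest (s : String) (out : Bool) : Prop := out = loneliest_alt s
instance (s : String) (out : Bool) : Decidable (Spec_loneliest s out) := by unfold Spec_loneliest; infer_instance

-- ===== CLAIM (what is proved, stated in full; the proofs are below) =====
def Claim_equal_loneliest : Prop := ∀ (s : String), Dom_loneliest s → Pre_loneliest s → Spec_loneliest s (loneliest s)

-- ===== LEMMAS AND PROOFS =====

-- fold is the identity when the guard fails on every element
theorem foldl_guard_false (cs : List Char) (l : List Int) (r0 : Int)
    (h : ∀ i ∈ l, ¬(0 ≤ i ∧ i < (cs.length : Int))) :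
    l.foldl (fun r i => if 0 ≤ i ∧ i < (cs.length : Int) then r + digOf cs i else r) r0 = r0 := by
  induction l generalizing r0 with
  | nil => rfl
  | cons a t ih =>
    simp only [List.foldl_cons]
    rw [if_neg (h a (by simp))]
    exact ih r0 (fun i hi => h i (by simp [hi]))

-- fold adds the mapped sum when the guard holds on every element
theorem foldl_guard_true (cs : List Char) (l : List Int) (r0 : Int)
    (h : ∀ i ∈ l, 0 ≤ i ∧ i < (cs.length : Int)) :
    l.foldl (fun r i => if 0 ≤ i ∧ i < (cs.length : Int) then r + digOf cs i else r) r0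
      = r0 + (l.map (digOf cs)).sum := by
  induction l generalizing r0 with
  | nil => simp
  | cons a t ih =>
    simp only [List.foldl_cons, List.map_cons, List.sum_cons]
    rw [if_pos (h a (by simp)), ih (r0 + digOf cs a) (fun i hi => h i (by simp [hi]))]
    ring

theorem pvScan_getElem? (vals : List Int) (acc : Int) (j : Nat) (hj : j ≤ vals.length) :
    (pvScan acc vals)[j]? = some (acc + (vals.take j).sum) := by
  induction vals generalizing acc j with
  | nil =>
    have : j = 0 := by simpa using hj
    subst this
    simp [pvScan]
  | cons v vs ih =>
    cases j with
    | zero => simp [pvScan]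
    | succ j' =>
      simp only [pvScan, List.getElem?_cons_succ, List.take_succ_cons, List.sum_cons]
      rw [ih (acc + v) j' (by simpa using hj)]
      ring_nf

theorem pvScan_length (vals : List Int) (acc : Int) : (pvScan acc vals).length = vals.length + 1 := by
  induction vals generalizing acc with
  | nil => rfl
  | cons v vs ih => simp [pvScan, ih]

theorem pvScan_getD (vals : List Int) (j : Int) (h0 : 0 ≤ j) (hj : j ≤ (vals.length : Int)) :
    PySem.List.pyGetD (pvScan 0 vals) j 0 = (vals.take j.toNat).sum := by
  rw [PySem.List.pyGetD_eq_getElem _ _ h0 (by rw [pvScan_length]; omega)]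
  have := pvScan_getElem? vals 0 j.toNat (by omega)
  rw [List.getElem?_eq_getElem (by rw [pvScan_length]; omega)] at this
  simpa using Option.some.inj this

-- digOf agrees with the vals array on in-range indices
theorem digOf_eq_vals (cs : List Char) (i : Int) (h0 : 0 ≤ i) (hn : i < (cs.length : Int)) :
    digOf cs i = (cs.map (fun c => (c.toNat : Int) - 48))[i.toNat]'(by simp; omega) := by
  unfold digOf
  rw [PySem.List.pyGet?_eq_some_getElem _ h0 hn]
  simp

-- window sum as a difference of prefix sums
theorem sum_range_take (cs : List Char) (m : Nat) :
    ∀ (lo hi : Int), 0 ≤ lo → lo ≤ hi → hi ≤ (cs.length : Int) → (hi - lo).toNat = m →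
    ((PySem.List.pyRange lo hi 1).map (digOf cs)).sum
      = ((cs.map (fun c => (c.toNat : Int) - 48)).take hi.toNat).sum
        - ((cs.map (fun c => (c.toNat : Int) - 48)).take lo.toNat).sum := by
  induction m with
  | zero =>
    intro lo hi h0 hlh hhn hm
    have : hi = lo := by omega
    subst this
    simp [PySem.List.pyRange_one_eq_nil le_rfl]
  | succ m ih =>
    intro lo hi h0 hlh hhn hm
    have hlt : lo ≤ hi - 1 := by omega
    rw [show hi = (hi - 1) + 1 by ring, PySem.List.pyRange_one_succ_right hlt]
    rw [List.map_append, List.sum_append]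
    rw [ih lo (hi - 1) h0 hlt (by omega) (by omega)]
    have htake : ((cs.map (fun c => (c.toNat : Int) - 48)).take ((hi - 1) + 1).toNat).sum
        = ((cs.map (fun c => (c.toNat : Int) - 48)).take (hi - 1).toNat).sum
          + digOf cs (hi - 1) := by
      rw [show ((hi - 1) + 1).toNat = (hi - 1).toNat + 1 by omega]
      rw [List.take_add_one]
      rw [List.getElem?_eq_getElem (by simp; omega)]
      rw [digOf_eq_vals cs (hi - 1) (by omega) (by omega)]
      simp
    rw [htake]
    simp
    ring

-- the window fold equals a difference of clamped prefix sums
theorem window_eq (cs : List Char) (k x lo hi : Int) (hx : 0 ≤ x)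
    (hlo : lo = max 0 (k - x)) (hhi : hi = min (cs.length : Int) (k + x + 1))
    (h0 : 0 ≤ k) (hn : k < (cs.length : Int)) :
    (PySem.List.pyRange (k - x) (k + x + 1) 1).foldl
      (fun r i => if 0 ≤ i ∧ i < (cs.length : Int) then r + digOf cs i else r) (-x)
    = PySem.List.pyGetD (pvScan 0 (cs.map (fun c => (c.toNat : Int) - 48))) hi 0
      - PySem.List.pyGetD (pvScan 0 (cs.map (fun c => (c.toNat : Int) - 48))) lo 0 - x := by
  have hlo0 : 0 ≤ lo := hlo ▸ le_max_left _ _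
  have hlo1 : k - x ≤ lo := hlo ▸ le_max_right _ _
  have hlo2 : lo ≤ k := hlo ▸ max_le h0 (by omega)
  have hloc : lo = 0 ∨ lo = k - x := hlo ▸ max_choice _ _
  have hhi0 : hi ≤ (cs.length : Int) := hhi ▸ min_le_left _ _
  have hhi1 : hi ≤ k + x + 1 := hhi ▸ min_le_right _ _
  have hhi2 : k < hi := hhi ▸ lt_min hn (by omega)
  have hhic : hi = (cs.length : Int) ∨ hi = k + x + 1 := hhi ▸ min_choice _ _
  rw [PySem.List.pyRange_one_append (k - x) lo (k + x + 1) (by omega) (by omega)]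
  rw [PySem.List.pyRange_one_append lo hi (k + x + 1) (by omega) (by omega)]
  rw [List.foldl_append, List.foldl_append]
  rw [foldl_guard_false cs _ (-x) (by
    intro i hmem
    rw [PySem.List.mem_pyRange_one] at hmem
    rcases hloc with h | h <;> omega)]
  rw [foldl_guard_true cs _ (-x) (by
    intro i hmem
    rw [PySem.List.mem_pyRange_one] at hmem
    constructor <;> omega)]
  rw [foldl_guard_false cs _ _ (by
    intro i hmem
    rw [PySem.List.mem_pyRange_one] at hmem
    rcases hhic with h | h <;> omega)]
  rw [sum_range_take cs (hi - lo).toNat lo hi (by omega) (by omega) (by omega) rfl]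
  rw [pvScan_getD _ hi (by omega) (by rw [List.length_map]; omega)]
  rw [pvScan_getD _ lo (by omega) (by rw [List.length_map]; omega)]
  ring

theorem digOf_nonneg (cs : List Char) (hd : ∀ c ∈ cs, c.isDigit = true) (k : Int)
    (h0 : 0 ≤ k) (hn : k < (cs.length : Int)) : 0 ≤ digOf cs k := by
  rw [digOf_eq_vals cs k h0 hn]
  have hc := hd (cs[k.toNat]'(by omega)) (List.getElem_mem _)
  simp only [Char.isDigit, Bool.and_eq_true, decide_eq_true_eq] at hc
  have h48 : 48 ≤ (cs[k.toNat]'(by omega)).toNat := by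
    exact le_trans (by decide) (UInt32.le_iff_toNat_le.mp hc.1)
  simp only [List.getElem_map]
  omega

-- the pointwise equality of A's f and B's f on in-range indices of a digit string
theorem f_eq (cs : List Char) (hd : ∀ c ∈ cs, c.isDigit = true) (k : Int)
    (h0 : 0 ≤ k) (hn : k < (cs.length : Int)) :
    lonF cs k = lonFB (cs.length : Int) (cs.map (fun c => (c.toNat : Int) - 48))
      (pvScan 0 (cs.map (fun c => (c.toNat : Int) - 48))) k := by
  have hx_eq : PySem.List.pyGetD (cs.map (fun c => (c.toNat : Int) - 48)) k 0 = digOf cs k := by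
    rw [PySem.List.pyGetD_eq_getElem _ _ h0 (by simp; omega)]
    rw [digOf_eq_vals cs k h0 hn]
  simp only [lonF, lonFB, hx_eq]
  exact window_eq cs k (digOf cs k) _ _ (digOf_nonneg cs hd k h0 hn) rfl rfl h0 hn

theorem any_congr_mem {α : Type} (l : List α) (f g : α → Bool)
    (h : ∀ a ∈ l, f a = g a) : l.any f = l.any g := by
  induction l with
  | nil => rfl
  | cons a t ih =>
    simp only [List.any_cons]
    rw [h a (by simp), ih (fun a ha => h a (by simp [ha]))]

-- ===== VERDICT (by name: the statement is the Claim_ definition above) =====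
theorem loneliest_spec : Claim_equal_loneliest := by
  intro s _hdom hpre
  unfold Spec_loneliest loneliest loneliest_alt
  set cs := s.toList with hcs
  set vals := cs.map (fun c => (c.toNat : Int) - 48) with hvals
  have hmap : (PySem.List.pyRange 0 cs.length 1).map (lonF cs)
      = (PySem.List.pyRange 0 cs.length 1).map (lonFB (cs.length : Int) vals (pvScan 0 vals)) := by
    apply List.map_congr_left
    intro i hi
    rw [PySem.List.mem_pyRange_one] at hi
    exact f_eq cs (List.all_eq_true.mp hpre.2) i hi.1 hi.2
  simp only [← hvals]
  rw [hmap]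
  cases hmin : PySem.List.min? ((PySem.List.pyRange 0 (cs.length : Int) 1).map (lonFB (cs.length : Int) vals (pvScan 0 vals))) (fun v => v) with
  | none => rfl
  | some m =>
    apply any_congr_mem
    intro i hi
    rw [PySem.List.mem_pyRange_one] at hi
    rw [f_eq cs (List.all_eq_true.mp hpre.2) i hi.1 hi.2]
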